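-- pv_equiv track=rewrite | github.com/miread/matrix-diagonal-products | diagonal_product.py | sum_prod_diags
-- ===== SOURCE A (Python) =====
-- def sum_prod_diags(matrix):
--
--     size = len(matrix[0])
--     sum1, sum2 = [], []
--     out1, out2 = 0, 0
--
--     for i in range(size):
--         product, idx, idx2 = 1, 0, i
--         while idx2 < size:
--             product = product * matrix[idx][idx2]
--             idx += 1
--             idx2 += 1
--         sum1.append(product)
--
--     for i in range(1, size):
--         product, idx, idx2 = 1, i, 0
--         while idx < size:
--             product = product * matrix[idx][idx2]
--             idx += 1
--             idx2 += 1
--         sum1.append(product)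
--
--     for i in range(size):
--         product, idx, idx2 = 1, i, size - 1
--         while idx < size:
--             product = product * matrix[idx][idx2]
--             idx += 1
--             idx2 -= 1
--         sum2.append(product)
--
--     for i in range(2, size + 1):
--         product, idx, idx2 = 1, 0, size - i
--         while idx2 >= 0:
--             product = product * matrix[idx][idx2]
--             idx += 1
--             idx2 -= 1
--         sum2.append(product)
--
--     for num in sum1:
--         out1 += num
--     for num in sum2:
--         out2 += num
--
--     return out1 - out2
-- ===== SOURCE B (Python) =====
-- def sum_prod_diags(matrix):
--     size = len(matrix[0])
--     d1, d2 = {}, {}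
--     for i in range(size):
--         for j in range(size):
--             v = matrix[i][j]
--             d1[i - j] = d1.get(i - j, 1) * v
--             d2[i + j] = d2.get(i + j, 1) * v
--     return sum(d1.values()) - sum(d2.values())
-- ===== Notes on version B (the rewrite author's own statement) =====
-- stated objective: simpler
-- what changed: Replaces A's four separate diagonal-walking while-loops and two accumulator lists by one row-major pass that multiplies each cell into two dicts keyed by i-j and i+j, then subtracts the sums of the dicts' values.
import Mathlib
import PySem

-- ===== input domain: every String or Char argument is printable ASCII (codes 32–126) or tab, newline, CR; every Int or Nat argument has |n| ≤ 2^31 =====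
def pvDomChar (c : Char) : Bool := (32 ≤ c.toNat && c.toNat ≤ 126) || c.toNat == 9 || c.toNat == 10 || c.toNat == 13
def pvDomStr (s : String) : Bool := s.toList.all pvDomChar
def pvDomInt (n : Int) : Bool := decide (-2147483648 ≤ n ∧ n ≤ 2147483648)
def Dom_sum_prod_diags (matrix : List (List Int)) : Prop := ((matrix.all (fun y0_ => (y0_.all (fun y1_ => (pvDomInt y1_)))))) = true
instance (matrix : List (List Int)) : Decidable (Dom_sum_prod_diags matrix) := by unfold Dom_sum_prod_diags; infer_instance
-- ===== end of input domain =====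

-- B replaces A's four diagonal-walking while-loops by one row-major pass over the grid that
-- multiplies each cell into two dicts keyed by i-j and i+j (objective: simpler, not faster).

-- matrix[i][j]; Pre_ guarantees the indices are in range, so the defaults are never returned
def pvCell (m : List (List Int)) (i j : Int) : Int :=
  PySem.List.pyGetD (PySem.List.pyGetD m i []) j 0

-- ===== PORT A =====
-- the four 'while' loops of A, one recursive helper each (state = product, idx, idx2)
def pvWhileA1 (m : List (List Int)) (size product idx idx2 : Int) : Int :=
  if idx2 < size then pvWhileA1 m size (product * pvCell m idx idx2) (idx + 1) (idx2 + 1)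
  else product
termination_by (size - idx2).toNat
decreasing_by omega

def pvWhileA2 (m : List (List Int)) (size product idx idx2 : Int) : Int :=
  if idx < size then pvWhileA2 m size (product * pvCell m idx idx2) (idx + 1) (idx2 + 1)
  else product
termination_by (size - idx).toNat
decreasing_by omega

def pvWhileA3 (m : List (List Int)) (size product idx idx2 : Int) : Int :=
  if idx < size then pvWhileA3 m size (product * pvCell m idx idx2) (idx + 1) (idx2 - 1)
  else product
termination_by (size - idx).toNat
decreasing_by omega

def pvWhileA4 (m : List (List Int)) (size product idx idx2 : Int) : Int :=
  if idx2 ≥ 0 then pvWhileA4 m size (product * pvCell m idx idx2) (idx + 1) (idx2 - 1)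
  else product
termination_by (idx2 + 1).toNat
decreasing_by omega

def sum_prod_diags (matrix : List (List Int)) : Int :=
  let size : Int := (PySem.List.pyGetD matrix 0 []).length
  let sum1 := (PySem.List.pyRange 0 size 1).foldl
    (fun acc i => acc ++ [pvWhileA1 matrix size 1 0 i]) []
  let sum1 := (PySem.List.pyRange 1 size 1).foldl
    (fun acc i => acc ++ [pvWhileA2 matrix size 1 i 0]) sum1
  let sum2 := (PySem.List.pyRange 0 size 1).foldl
    (fun acc i => acc ++ [pvWhileA3 matrix size 1 i (size - 1)]) []
  let sum2 := (PySem.List.pyRange 2 (size + 1) 1).foldl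
    (fun acc i => acc ++ [pvWhileA4 matrix size 1 0 (size - i)]) sum2
  let out1 := sum1.foldl (fun acc num => acc + num) 0
  let out2 := sum2.foldl (fun acc num => acc + num) 0
  out1 - out2

-- ===== PORT B =====
def sum_prod_diags_alt (matrix : List (List Int)) : Int :=
  let size : Int := (PySem.List.pyGetD matrix 0 []).length
  let dd : PySem.Dict Int Int × PySem.Dict Int Int :=
    (PySem.List.pyRange 0 size 1).foldl (fun dd i =>
      (PySem.List.pyRange 0 size 1).foldl (fun dd j =>
        let v := pvCell matrix i j
        (dd.1.insert (i - j) (dd.1.getD (i - j) 1 * v),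
         dd.2.insert (i + j) (dd.2.getD (i + j) 1 * v))) dd)
      (PySem.Dict.empty, PySem.Dict.empty)
  (dd.1.values).sum - (dd.2.values).sum

-- ===== PRECONDITION & SPEC =====
-- A (and B) read matrix[0] and every cell matrix[i][j] with i,j < len(matrix[0]);
-- Pre_ excludes exactly the inputs where one of those accesses raises IndexError.
def Pre_sum_prod_diags (matrix : List (List Int)) : Prop :=
  matrix ≠ [] ∧ (matrix.headI).length ≤ matrix.length ∧
    ∀ row ∈ matrix.take (matrix.headI).length, (matrix.headI).length ≤ row.length
instance (matrix : List (List Int)) : Decidable (Pre_sum_prod_diags matrix) := by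
  unfold Pre_sum_prod_diags; infer_instance

def pvWitness_sum_prod_diags : List (List Int) := [[1, 2], [3, 4]]

def Spec_sum_prod_diags (matrix : List (List Int)) (out : Int) : Prop := out = sum_prod_diags_alt matrix
instance (matrix : List (List Int)) (out : Int) : Decidable (Spec_sum_prod_diags matrix out) := by unfold Spec_sum_prod_diags; infer_instance

-- ===== CLAIM (what is proved, stated in full; the proofs are below) =====
def Claim_equal_sum_prod_diags : Prop := ∀ (matrix : List (List Int)), Dom_sum_prod_diags matrix → Pre_sum_prod_diags matrix → Spec_sum_prod_diags matrix (sum_prod_diags matrix)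

-- ===== LEMMAS AND PROOFS =====

-- the two diagonal products, written as padded products over the full row range
def pvP1 (c : Int → Int → Int) (n : Nat) (k : Int) : Int :=
  ((List.range n).map (fun i : Nat => if 0 ≤ (i : Int) - k ∧ (i : Int) - k < (n : Int) then c i ((i : Int) - k) else 1)).prod
def pvP2 (c : Int → Int → Int) (n : Nat) (k : Int) : Int :=
  ((List.range n).map (fun i : Nat => if 0 ≤ k - (i : Int) ∧ k - (i : Int) < (n : Int) then c i (k - (i : Int)) else 1)).prod

-- a product over range n of a function that is ≠ 1 at a single index t
theorem pvProd_ite_single (n : Nat) (t : Int) (f : Int → Int) :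
    ((List.range n).map (fun j : Nat => if (j : Int) = t then f (j : Int) else 1)).prod
      = if 0 ≤ t ∧ t < (n : Int) then f t else 1 := by
  induction n with
  | zero => rw [if_neg (by omega)]; simp
  | succ n ih =>
    rw [List.range_succ, List.map_append, List.prod_append, ih]
    simp only [List.map_cons, List.map_nil, List.prod_cons, List.prod_nil]
    by_cases h : (n : Int) = t
    · rw [if_neg (by omega), if_pos h, if_pos (by omega), h]
      ring
    · rw [if_neg h]
      by_cases h2 : 0 ≤ t ∧ t < (n : Int)
      · rw [if_pos h2, if_pos (by push_cast; omega)]; ring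
      · rw [if_neg h2, if_neg (by push_cast; omega)]; ring

-- padded product over range n, live part an initial segment
theorem pvProd_ite_lt (n m : Nat) (f : Nat → Int) (h : m ≤ n) :
    ((List.range n).map (fun i => if i < m then f i else 1)).prod
      = ((List.range m).map f).prod := by
  obtain ⟨d, rfl⟩ : ∃ d, n = m + d := ⟨n - m, by omega⟩
  rw [List.range_add, List.map_append, List.prod_append]
  have h1 : ((List.range m).map (fun i => if i < m then f i else 1)) = (List.range m).map f := by
    apply List.map_congr_left
    intro i hi
    rw [if_pos (List.mem_range.mp hi)]
  have h2 : (((List.range d).map (fun x => m + x)).map (fun i => if i < m then f i else 1)).prod = 1 := by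
    apply List.prod_eq_one
    intro x hx
    simp only [List.mem_map] at hx
    obtain ⟨y, ⟨z, hz, rfl⟩, rfl⟩ := hx
    rw [if_neg (by omega)]
  rw [h1, h2, mul_one]

-- padded product over range n, live part a final segment
theorem pvProd_ite_ge (n m : Nat) (f : Nat → Int) (h : m ≤ n) :
    ((List.range n).map (fun i => if m ≤ i then f i else 1)).prod
      = ((List.range (n - m)).map (fun r => f (m + r))).prod := by
  obtain ⟨d, rfl⟩ : ∃ d, n = m + d := ⟨n - m, by omega⟩
  have hd : m + d - m = d := by omega
  rw [hd, List.range_add, List.map_append, List.prod_append]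
  have h1 : ((List.range m).map (fun i => if m ≤ i then f i else 1)).prod = 1 := by
    apply List.prod_eq_one
    intro x hx
    simp only [List.mem_map] at hx
    obtain ⟨y, hy, rfl⟩ := hx
    have := List.mem_range.mp hy
    rw [if_neg (by omega)]
  have h2 : ((List.range d).map (fun x => m + x)).map (fun i => if m ≤ i then f i else 1)
      = (List.range d).map (fun r => f (m + r)) := by
    rw [List.map_map]
    apply List.map_congr_left
    intro x _
    simp only [Function.comp]
    rw [if_pos (by omega)]
  rw [h1, h2, one_mul]

-- closed forms of the four while loops
theorem pvWhileA1_eq (m : List (List Int)) (s : Int) (d : Nat) :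
    ∀ (p idx idx2 : Int), idx2 + d = s →
    pvWhileA1 m s p idx idx2 = p * ((List.range d).map (fun r : Nat => pvCell m (idx + (r : Int)) (idx2 + (r : Int)))).prod := by
  induction d with
  | zero => intro p idx idx2 h; rw [pvWhileA1]; rw [if_neg (by omega)]; simp
  | succ d ih =>
    intro p idx idx2 h
    rw [pvWhileA1, if_pos (by omega), ih _ _ _ (by omega)]
    rw [List.range_succ_eq_map, List.map_cons, List.prod_cons, List.map_map]
    have harg : pvCell m (idx + ((0 : Nat) : Int)) (idx2 + ((0 : Nat) : Int)) = pvCell m idx idx2 := by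
      norm_num
    rw [harg, ← mul_assoc]
    congr 1
    congr 1
    apply List.map_congr_left
    intro x _
    simp only [Function.comp]
    congr 1 <;> push_cast <;> ring

theorem pvWhileA2_eq (m : List (List Int)) (s : Int) (d : Nat) :
    ∀ (p idx idx2 : Int), idx + d = s →
    pvWhileA2 m s p idx idx2 = p * ((List.range d).map (fun r : Nat => pvCell m (idx + (r : Int)) (idx2 + (r : Int)))).prod := by
  induction d with
  | zero => intro p idx idx2 h; rw [pvWhileA2]; rw [if_neg (by omega)]; simp
  | succ d ih =>
    intro p idx idx2 h
    rw [pvWhileA2, if_pos (by omega), ih _ _ _ (by omega)]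
    rw [List.range_succ_eq_map, List.map_cons, List.prod_cons, List.map_map]
    have harg : pvCell m (idx + ((0 : Nat) : Int)) (idx2 + ((0 : Nat) : Int)) = pvCell m idx idx2 := by
      norm_num
    rw [harg, ← mul_assoc]
    congr 1
    congr 1
    apply List.map_congr_left
    intro x _
    simp only [Function.comp]
    congr 1 <;> push_cast <;> ring

theorem pvWhileA3_eq (m : List (List Int)) (s : Int) (d : Nat) :
    ∀ (p idx idx2 : Int), idx + d = s →
    pvWhileA3 m s p idx idx2 = p * ((List.range d).map (fun r : Nat => pvCell m (idx + (r : Int)) (idx2 - (r : Int)))).prod := by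
  induction d with
  | zero => intro p idx idx2 h; rw [pvWhileA3]; rw [if_neg (by omega)]; simp
  | succ d ih =>
    intro p idx idx2 h
    rw [pvWhileA3, if_pos (by omega), ih _ _ _ (by omega)]
    rw [List.range_succ_eq_map, List.map_cons, List.prod_cons, List.map_map]
    have harg : pvCell m (idx + ((0 : Nat) : Int)) (idx2 - ((0 : Nat) : Int)) = pvCell m idx idx2 := by
      norm_num
    rw [harg, ← mul_assoc]
    congr 1
    congr 1
    apply List.map_congr_left
    intro x _
    simp only [Function.comp]
    congr 1 <;> push_cast <;> ring

theorem pvWhileA4_eq (m : List (List Int)) (s : Int) (d : Nat) :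
    ∀ (p idx idx2 : Int), idx2 = (d : Int) - 1 →
    pvWhileA4 m s p idx idx2 = p * ((List.range d).map (fun r : Nat => pvCell m (idx + (r : Int)) (idx2 - (r : Int)))).prod := by
  induction d with
  | zero => intro p idx idx2 h; rw [pvWhileA4]; rw [if_neg (by omega)]; simp
  | succ d ih =>
    intro p idx idx2 h
    rw [pvWhileA4, if_pos (by omega), ih _ _ _ (by omega)]
    rw [List.range_succ_eq_map, List.map_cons, List.prod_cons, List.map_map]
    have harg : pvCell m (idx + ((0 : Nat) : Int)) (idx2 - ((0 : Nat) : Int)) = pvCell m idx idx2 := by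
      norm_num
    rw [harg, ← mul_assoc]
    congr 1
    congr 1
    apply List.map_congr_left
    intro x _
    simp only [Function.comp]
    congr 1 <;> push_cast <;> ring

-- a fold with componentwise step splits into two folds
theorem pvFoldl_prod_split {α σ τ : Type} (l : List α) (f : σ → α → σ) (g : τ → α → τ)
    (x : σ) (y : τ) :
    l.foldl (fun p a => (f p.1 a, g p.2 a)) (x, y) = (l.foldl f x, l.foldl g y) := by
  induction l generalizing x y with
  | nil => rfl
  | cons a t ih => simp [List.foldl_cons, ih]

-- multiplicative grouping: final lookup of a multiply-into-bucket fold
theorem pvGetD_group_mul {β : Type} (l : List β) (key val : β → Int) (d : PySem.Dict Int Int) (k : Int) :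
    (l.foldl (fun d a => d.insert (key a) (d.getD (key a) 1 * val a)) d).getD k 1
      = d.getD k 1 * (l.map (fun a => if key a = k then val a else 1)).prod := by
  induction l generalizing d with
  | nil => simp
  | cons a t ih =>
    rw [List.foldl_cons, ih, List.map_cons, List.prod_cons]
    rw [PySem.Dict.getD_insert]
    by_cases h : k = key a
    · rw [if_pos h, if_pos h.symm]; subst h; ring
    · rw [if_neg h, if_neg (fun hh => h hh.symm)]; ring

-- product over a flatMap
theorem pvProd_flatMap {α : Type} (l : List α) (g : α → List Int) :
    (l.flatMap g).prod = (l.map (fun a => (g a).prod)).prod := by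
  induction l with
  | nil => rfl
  | cons a t ih => rw [List.flatMap_cons, List.prod_append, ih, List.map_cons, List.prod_cons]

-- key lists: A's diagonal order and B's dict-key order
def pvK1 (n : Nat) : List Int :=
  (PySem.List.pyRange 0 (n : Int) 1).map (fun i => -i) ++ PySem.List.pyRange 1 (n : Int) 1
def pvK2 (n : Nat) : List Int :=
  (PySem.List.pyRange 0 (n : Int) 1).map (fun i => i + ((n : Int) - 1))
    ++ (PySem.List.pyRange 2 ((n : Int) + 1) 1).map (fun i => (n : Int) - i)
def pvGrid (n : Nat) : List (Int × Int) :=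
  (PySem.List.pyRange 0 (n : Int) 1).flatMap (fun i => (PySem.List.pyRange 0 (n : Int) 1).map (fun j => (i, j)))

theorem pvNodup_pyRange_one (a b : Int) : (PySem.List.pyRange a b 1).Nodup := by
  rw [PySem.List.pyRange_of_pos a b (by norm_num)]
  refine List.Nodup.map ?_ List.nodup_range
  intro x y h
  simp only [one_mul, add_right_inj, Nat.cast_inj] at h
  exact h

theorem pvFoldl_sum (l : List Int) (a : Int) :
    l.foldl (fun acc num => acc + num) a = a + l.sum := by
  rw [PySem.List.foldl_add l (fun x => x) a]
  simp

-- the four per-diagonal identities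
theorem pvA1_eq (m : List (List Int)) (n a : Nat) (ha : a < n) :
    pvWhileA1 m (n : Int) 1 0 (a : Int) = pvP1 (pvCell m) n (-(a : Int)) := by
  rw [pvWhileA1_eq m (n : Int) (n - a) 1 0 (a : Int) (by push_cast; omega), one_mul]
  unfold pvP1
  have hmap : (List.range n).map (fun i : Nat => if 0 ≤ (i : Int) - (-(a : Int)) ∧ (i : Int) - (-(a : Int)) < (n : Int) then pvCell m i ((i : Int) - (-(a : Int))) else 1)
      = (List.range n).map (fun i : Nat => if i < n - a then pvCell m i ((i : Int) + (a : Int)) else 1) := by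
    apply List.map_congr_left
    intro i hi
    have hi' := List.mem_range.mp hi
    by_cases hc : i < n - a
    · rw [if_pos (by push_cast; omega), if_pos hc]
      congr 1
      ring
    · rw [if_neg (by push_cast; omega), if_neg hc]
  rw [hmap, pvProd_ite_lt n (n - a) _ (by omega)]
  congr 1
  apply List.map_congr_left
  intro r _
  congr 1 <;> push_cast <;> ring

theorem pvA2_eq (m : List (List Int)) (n a : Nat) (ha : a ≤ n) :
    pvWhileA2 m (n : Int) 1 (a : Int) 0 = pvP1 (pvCell m) n (a : Int) := by
  rw [pvWhileA2_eq m (n : Int) (n - a) 1 (a : Int) 0 (by push_cast; omega), one_mul]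
  unfold pvP1
  have hmap : (List.range n).map (fun i : Nat => if 0 ≤ (i : Int) - (a : Int) ∧ (i : Int) - (a : Int) < (n : Int) then pvCell m i ((i : Int) - (a : Int)) else 1)
      = (List.range n).map (fun i : Nat => if a ≤ i then pvCell m i ((i : Int) - (a : Int)) else 1) := by
    apply List.map_congr_left
    intro i hi
    have hi' := List.mem_range.mp hi
    by_cases hc : a ≤ i
    · rw [if_pos (by push_cast; omega), if_pos hc]
    · rw [if_neg (by push_cast; omega), if_neg hc]
  rw [hmap, pvProd_ite_ge n a _ (by omega)]
  congr 1
  apply List.map_congr_left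
  intro r _
  congr 1 <;> push_cast <;> ring

theorem pvA3_eq (m : List (List Int)) (n a : Nat) (ha : a < n) :
    pvWhileA3 m (n : Int) 1 (a : Int) ((n : Int) - 1) = pvP2 (pvCell m) n ((a : Int) + (n : Int) - 1) := by
  rw [pvWhileA3_eq m (n : Int) (n - a) 1 (a : Int) ((n : Int) - 1) (by push_cast; omega), one_mul]
  unfold pvP2
  have hmap : (List.range n).map (fun i : Nat => if 0 ≤ ((a : Int) + (n : Int) - 1) - (i : Int) ∧ ((a : Int) + (n : Int) - 1) - (i : Int) < (n : Int) then pvCell m i (((a : Int) + (n : Int) - 1) - (i : Int)) else 1)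
      = (List.range n).map (fun i : Nat => if a ≤ i then pvCell m i (((a : Int) + (n : Int) - 1) - (i : Int)) else 1) := by
    apply List.map_congr_left
    intro i hi
    have hi' := List.mem_range.mp hi
    by_cases hc : a ≤ i
    · rw [if_pos (by push_cast; omega), if_pos hc]
    · rw [if_neg (by push_cast; omega), if_neg hc]
  rw [hmap, pvProd_ite_ge n a _ (by omega)]
  congr 1
  apply List.map_congr_left
  intro r _
  congr 1 <;> push_cast <;> ring

theorem pvA4_eq (m : List (List Int)) (n a : Nat) (ha2 : 2 ≤ a) (han : a ≤ n) :
    pvWhileA4 m (n : Int) 1 0 ((n : Int) - (a : Int)) = pvP2 (pvCell m) n ((n : Int) - (a : Int)) := by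
  rw [pvWhileA4_eq m (n : Int) (n - a + 1) 1 0 ((n : Int) - (a : Int)) (by push_cast; omega), one_mul]
  unfold pvP2
  have hmap : (List.range n).map (fun i : Nat => if 0 ≤ ((n : Int) - (a : Int)) - (i : Int) ∧ ((n : Int) - (a : Int)) - (i : Int) < (n : Int) then pvCell m i (((n : Int) - (a : Int)) - (i : Int)) else 1)
      = (List.range n).map (fun i : Nat => if i < n - a + 1 then pvCell m i (((n : Int) - (a : Int)) - (i : Int)) else 1) := by
    apply List.map_congr_left
    intro i hi
    have hi' := List.mem_range.mp hi
    by_cases hc : i < n - a + 1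
    · rw [if_pos (by push_cast; omega), if_pos hc]
    · rw [if_neg (by push_cast; omega), if_neg hc]
  rw [hmap, pvProd_ite_lt n (n - a + 1) _ (by omega)]
  congr 1
  apply List.map_congr_left
  intro r _
  congr 1 <;> push_cast <;> ring

-- A's result, as sums of diagonal products over A's key order
theorem pvSideA (matrix : List (List Int)) :
    sum_prod_diags matrix
      = ((pvK1 (PySem.List.pyGetD matrix 0 []).length).map (pvP1 (pvCell matrix) (PySem.List.pyGetD matrix 0 []).length)).sum
        - ((pvK2 (PySem.List.pyGetD matrix 0 []).length).map (pvP2 (pvCell matrix) (PySem.List.pyGetD matrix 0 []).length)).sum := by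
  set n : Nat := (PySem.List.pyGetD matrix 0 []).length with hn
  simp only [sum_prod_diags, pvK1, pvK2, PySem.List.foldl_append_singleton_eq_map,
    List.nil_append, pvFoldl_sum, List.map_append, List.map_map, List.sum_append, zero_add]
  rw [← hn]
  congr 1
  · congr 1
    · congr 1
      apply List.map_congr_left
      intro i hi
      obtain ⟨h0, h1⟩ := PySem.List.mem_pyRange_one.mp hi
      lift i to Nat using h0 with a
      exact pvA1_eq matrix n a (by exact_mod_cast h1)
    · congr 1
      apply List.map_congr_left
      intro i hi
      obtain ⟨h0, h1⟩ := PySem.List.mem_pyRange_one.mp hi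
      lift i to Nat using (by omega : (0:Int) ≤ i) with a
      exact pvA2_eq matrix n a (by exact_mod_cast le_of_lt h1)
  · congr 1
    · congr 1
      apply List.map_congr_left
      intro i hi
      obtain ⟨h0, h1⟩ := PySem.List.mem_pyRange_one.mp hi
      lift i to Nat using h0 with a
      rw [show ((pvP2 (pvCell matrix) n ∘ fun i => i + ((n : Int) - 1)) (a : Int))
            = pvP2 (pvCell matrix) n ((a : Int) + (n : Int) - 1) by
          simp only [Function.comp]; congr 1; ring]
      exact pvA3_eq matrix n a (by exact_mod_cast h1)
    · congr 1
      apply List.map_congr_left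
      intro i hi
      obtain ⟨h0, h1⟩ := PySem.List.mem_pyRange_one.mp hi
      lift i to Nat using (by omega : (0:Int) ≤ i) with a
      exact pvA4_eq matrix n a (by exact_mod_cast h0)
        (by exact_mod_cast (by omega : (a : Int) ≤ (n : Int)))

-- the grouped product over the whole grid picks out one diagonal
theorem pvGridProd1 (m : List (List Int)) (n : Nat) (k : Int) :
    ((pvGrid n).map (fun p => if p.1 - p.2 = k then pvCell m p.1 p.2 else 1)).prod
      = pvP1 (pvCell m) n k := by
  unfold pvGrid pvP1
  rw [List.map_flatMap, pvProd_flatMap, PySem.List.pyRange_zero_natCast, List.map_map]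
  congr 1
  apply List.map_congr_left
  intro i _
  simp only [Function.comp, List.map_map]
  have hinner : ((List.range n).map ((fun p : Int × Int => if p.1 - p.2 = k then pvCell m p.1 p.2 else 1) ∘ (fun j : Int => ((i : Int), j)) ∘ (fun j : Nat => (j : Int))))
      = (List.range n).map (fun j : Nat => if (j : Int) = (i : Int) - k then pvCell m i (j : Int) else 1) := by
    apply List.map_congr_left
    intro j _
    simp only [Function.comp]
    by_cases hc : (j : Int) = (i : Int) - k
    · rw [if_pos (by omega), if_pos hc]
    · rw [if_neg (by omega), if_neg hc]
  rw [hinner, pvProd_ite_single n ((i : Int) - k) (fun j => pvCell m i j)]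

theorem pvGridProd2 (m : List (List Int)) (n : Nat) (k : Int) :
    ((pvGrid n).map (fun p => if p.1 + p.2 = k then pvCell m p.1 p.2 else 1)).prod
      = pvP2 (pvCell m) n k := by
  unfold pvGrid pvP2
  rw [List.map_flatMap, pvProd_flatMap, PySem.List.pyRange_zero_natCast, List.map_map]
  congr 1
  apply List.map_congr_left
  intro i _
  simp only [Function.comp, List.map_map]
  have hinner : ((List.range n).map ((fun p : Int × Int => if p.1 + p.2 = k then pvCell m p.1 p.2 else 1) ∘ (fun j : Int => ((i : Int), j)) ∘ (fun j : Nat => (j : Int))))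
      = (List.range n).map (fun j : Nat => if (j : Int) = k - (i : Int) then pvCell m i (j : Int) else 1) := by
    apply List.map_congr_left
    intro j _
    simp only [Function.comp]
    by_cases hc : (j : Int) = k - (i : Int)
    · rw [if_pos (by omega), if_pos hc]
    · rw [if_neg (by omega), if_neg hc]
  rw [hinner, pvProd_ite_single n (k - (i : Int)) (fun j => pvCell m i j)]

-- B's result, as sums of the same diagonal products over the dicts' key sets
theorem pvSideB (matrix : List (List Int)) :
    sum_prod_diags_alt matrix
      = ((PySem.Set.ofList ((pvGrid (PySem.List.pyGetD matrix 0 []).length).map (fun p => p.1 - p.2))).map (pvP1 (pvCell matrix) (PySem.List.pyGetD matrix 0 []).length)).sum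
        - ((PySem.Set.ofList ((pvGrid (PySem.List.pyGetD matrix 0 []).length).map (fun p => p.1 + p.2))).map (pvP2 (pvCell matrix) (PySem.List.pyGetD matrix 0 []).length)).sum := by
  set n : Nat := (PySem.List.pyGetD matrix 0 []).length with hn
  simp only [sum_prod_diags_alt]
  rw [← hn]
  have hinner : ∀ (dd : PySem.Dict Int Int × PySem.Dict Int Int) (i : Int),
      (PySem.List.pyRange 0 (n : Int) 1).foldl (fun dd j =>
          (dd.1.insert (i - j) (dd.1.getD (i - j) 1 * pvCell matrix i j),
           dd.2.insert (i + j) (dd.2.getD (i + j) 1 * pvCell matrix i j))) dd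
        = ((PySem.List.pyRange 0 (n : Int) 1).foldl (fun d j => d.insert (i - j) (d.getD (i - j) 1 * pvCell matrix i j)) dd.1,
           (PySem.List.pyRange 0 (n : Int) 1).foldl (fun d j => d.insert (i + j) (d.getD (i + j) 1 * pvCell matrix i j)) dd.2) := by
    intro dd i
    rw [← Prod.mk.eta (p := dd)]
    exact pvFoldl_prod_split (PySem.List.pyRange 0 (n : Int) 1)
      (fun d j => d.insert (i - j) (d.getD (i - j) 1 * pvCell matrix i j))
      (fun d j => d.insert (i + j) (d.getD (i + j) 1 * pvCell matrix i j)) dd.1 dd.2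
  simp only [hinner]
  rw [pvFoldl_prod_split (PySem.List.pyRange 0 (n : Int) 1)
      (fun d i => (PySem.List.pyRange 0 (n : Int) 1).foldl (fun d j => d.insert (i - j) (d.getD (i - j) 1 * pvCell matrix i j)) d)
      (fun d i => (PySem.List.pyRange 0 (n : Int) 1).foldl (fun d j => d.insert (i + j) (d.getD (i + j) 1 * pvCell matrix i j)) d)
      PySem.Dict.empty PySem.Dict.empty]
  have hside : ∀ (key : Int → Int → Int) (pkey : Int × Int → Int),
      (∀ i j : Int, key i j = pkey (i, j)) →
      ((PySem.List.pyRange 0 (n : Int) 1).foldl (fun d i =>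
          (PySem.List.pyRange 0 (n : Int) 1).foldl (fun d j => d.insert (key i j) (d.getD (key i j) 1 * pvCell matrix i j)) d)
        PySem.Dict.empty).values.sum
        = ((PySem.Set.ofList ((pvGrid n).map pkey)).map
            (fun k => ((pvGrid n).map (fun p => if pkey p = k then pvCell matrix p.1 p.2 else 1)).prod)).sum := by
    intro key pkey hkey
    have hflat : ((PySem.List.pyRange 0 (n : Int) 1).foldl (fun d i =>
          (PySem.List.pyRange 0 (n : Int) 1).foldl (fun d j => d.insert (key i j) (d.getD (key i j) 1 * pvCell matrix i j)) d)
        PySem.Dict.empty)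
        = (pvGrid n).foldl (fun d p => d.insert (pkey p) (d.getD (pkey p) 1 * pvCell matrix p.1 p.2)) PySem.Dict.empty := by
      unfold pvGrid
      rw [List.foldl_flatMap]
      apply PySem.List.foldl_congr_mem
      intro acc i _
      rw [List.foldl_map]
      apply PySem.List.foldl_congr_mem
      intro d j _
      rw [hkey]
    rw [hflat]
    have hnodup : ((pvGrid n).foldl (fun d p => d.insert (pkey p) (d.getD (pkey p) 1 * pvCell matrix p.1 p.2)) PySem.Dict.empty).keys.Nodup := by
      apply PySem.Dict.nodup_keys_foldl_insert_key
      rw [PySem.Dict.keys_empty]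
      exact List.nodup_nil
    have hkeys : ((pvGrid n).foldl (fun d p => d.insert (pkey p) (d.getD (pkey p) 1 * pvCell matrix p.1 p.2)) PySem.Dict.empty).keys
        = PySem.Set.ofList ((pvGrid n).map pkey) := by
      rw [PySem.Dict.keys_foldl_insert_key (pvGrid n) pkey
        (fun d p => d.getD (pkey p) 1 * pvCell matrix p.1 p.2) PySem.Dict.empty]
      rw [PySem.Dict.keys_empty, PySem.Set.update_nil_left]
    rw [PySem.Dict.values_eq_map_keys _ hnodup 1, hkeys]
    congr 1
    apply List.map_congr_left
    intro k _
    rw [pvGetD_group_mul (pvGrid n) pkey (fun p => pvCell matrix p.1 p.2) PySem.Dict.empty k]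
    rw [PySem.Dict.getD_empty, one_mul]
  rw [hside (fun i j => i - j) (fun p => p.1 - p.2) (fun _ _ => rfl),
      hside (fun i j => i + j) (fun p => p.1 + p.2) (fun _ _ => rfl)]
  congr 1
  · congr 1
    apply List.map_congr_left
    intro k _
    exact pvGridProd1 matrix n k
  · congr 1
    apply List.map_congr_left
    intro k _
    exact pvGridProd2 matrix n k

-- the two key enumerations are permutations of each other
theorem pvMemGrid (n : Nat) (p : Int × Int) :
    p ∈ pvGrid n ↔ 0 ≤ p.1 ∧ p.1 < (n : Int) ∧ 0 ≤ p.2 ∧ p.2 < (n : Int) := by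
  unfold pvGrid
  simp only [List.mem_flatMap, List.mem_map, PySem.List.mem_pyRange_one]
  constructor
  · rintro ⟨i, hi, j, hj, rfl⟩
    exact ⟨hi.1, hi.2, hj.1, hj.2⟩
  · rintro ⟨h1, h2, h3, h4⟩
    exact ⟨p.1, ⟨h1, h2⟩, p.2, ⟨h3, h4⟩, rfl⟩

theorem pvPerm1 (n : Nat) :
    (PySem.Set.ofList ((pvGrid n).map (fun p => p.1 - p.2))).Perm (pvK1 n) := by
  have hnodup2 : (pvK1 n).Nodup := by
    unfold pvK1
    refine List.Nodup.append ?_ (pvNodup_pyRange_one 1 (n : Int)) ?_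
    · exact List.Nodup.map (fun x y h => neg_injective h) (pvNodup_pyRange_one 0 (n : Int))
    · intro x hx hx2
      simp only [List.mem_map, PySem.List.mem_pyRange_one] at hx hx2
      obtain ⟨i, hi, rfl⟩ := hx
      omega
  refine (List.perm_ext_iff_of_nodup (PySem.Set.nodup_ofList _) hnodup2).mpr ?_
  intro a
  rw [PySem.Set.mem_ofList]
  unfold pvK1
  simp only [List.mem_append, List.mem_map, PySem.List.mem_pyRange_one]
  constructor
  · rintro ⟨p, hp, rfl⟩
    rw [pvMemGrid] at hp
    by_cases hc : 1 ≤ p.1 - p.2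
    · exact Or.inr ⟨hc, by omega⟩
    · exact Or.inl ⟨-(p.1 - p.2), ⟨by omega, by omega⟩, by ring⟩
  · rintro (⟨i, hi, rfl⟩ | ha)
    · refine ⟨(0, i), ?_, by ring⟩
      rw [pvMemGrid]
      refine ⟨le_refl 0, by omega, hi.1, hi.2⟩
    · refine ⟨(a, 0), ?_, by ring⟩
      rw [pvMemGrid]
      refine ⟨by omega, by omega, le_refl 0, by omega⟩

theorem pvPerm2 (n : Nat) :
    (PySem.Set.ofList ((pvGrid n).map (fun p => p.1 + p.2))).Perm (pvK2 n) := by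
  have hnodup2 : (pvK2 n).Nodup := by
    unfold pvK2
    refine List.Nodup.append ?_ ?_ ?_
    · exact List.Nodup.map (fun x y h => by omega) (pvNodup_pyRange_one 0 (n : Int))
    · exact List.Nodup.map (fun x y h => by omega) (pvNodup_pyRange_one 2 ((n : Int) + 1))
    · intro x hx hx2
      simp only [List.mem_map, PySem.List.mem_pyRange_one] at hx hx2
      obtain ⟨i, hi, rfl⟩ := hx
      obtain ⟨j, hj, hij⟩ := hx2
      omega
  refine (List.perm_ext_iff_of_nodup (PySem.Set.nodup_ofList _) hnodup2).mpr ?_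
  intro a
  rw [PySem.Set.mem_ofList]
  unfold pvK2
  simp only [List.mem_append, List.mem_map, PySem.List.mem_pyRange_one]
  constructor
  · rintro ⟨p, hp, rfl⟩
    rw [pvMemGrid] at hp
    by_cases hc : (n : Int) - 1 ≤ p.1 + p.2
    · exact Or.inl ⟨p.1 + p.2 - ((n : Int) - 1), ⟨by omega, by omega⟩, by ring⟩
    · exact Or.inr ⟨(n : Int) - (p.1 + p.2), ⟨by omega, by omega⟩, by ring⟩
  · rintro (⟨i, hi, rfl⟩ | ⟨i, hi, rfl⟩)
    · refine ⟨(i, (n : Int) - 1), ?_, rfl⟩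
      rw [pvMemGrid]
      refine ⟨hi.1, hi.2, by omega, by omega⟩
    · refine ⟨((n : Int) - i, 0), ?_, by ring⟩
      rw [pvMemGrid]
      refine ⟨by omega, by omega, le_refl 0, by omega⟩

theorem pvMain (matrix : List (List Int)) : sum_prod_diags matrix = sum_prod_diags_alt matrix := by
  rw [pvSideA, pvSideB]
  rw [((pvPerm1 (PySem.List.pyGetD matrix 0 []).length).map (pvP1 (pvCell matrix) (PySem.List.pyGetD matrix 0 []).length)).sum_eq]
  rw [((pvPerm2 (PySem.List.pyGetD matrix 0 []).length).map (pvP2 (pvCell matrix) (PySem.List.pyGetD matrix 0 []).length)).sum_eq]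

-- ===== VERDICT (by name: the statement is the Claim_ definition above) =====
theorem sum_prod_diags_spec : Claim_equal_sum_prod_diags := by
  intro matrix _ _
  unfold Spec_sum_prod_diags
  exact pvMain matrix
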